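-- pv_equiv track=rewrite | github.com/Arisha1234567/- | 21.py | longest_substring_without_vowels
-- ===== SOURCE A (Python) =====
-- def longest_substring_without_vowels(s: str) -> int:
--     # Список гласных
--     vowels = ['a', 'e', 'i', 'o', 'u']
--     max_length = 0  # Максимальная длина подстроки
--     current_length = 0  # Текущая длина подстроки
--     # Итерируем по символам строки
--     for char in s:
--         if char not in vowels:  # Если символ не гласная
--             current_length += 1  # Увеличиваем текущую длину
--         else:
--             max_length = max(max_length, current_length)  # Обновляем максимальную длину
--             current_length = 0  # Сбрасываем текущую длину
--
--     max_length = max(max_length, current_length)  # Проверяем в конце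
--     return max_length  # Возвращаем максимальную длину
-- ===== SOURCE B (Python) =====
-- import re
--
-- def longest_substring_without_vowels(s: str) -> int:
--     # split s on lowercase vowels: the pieces are exactly the maximal
--     # vowel-free segments; the answer is the longest piece's length.
--     return max(len(t) for t in re.split(r'[aeiou]', s))
-- ===== Notes on version B (the rewrite author's own statement) =====
-- stated objective: simpler
-- what changed: Replaces the running max/current-length accumulator scan with a split of s on vowels (re.split) followed by a max over the segment lengths.
import Mathlib
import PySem

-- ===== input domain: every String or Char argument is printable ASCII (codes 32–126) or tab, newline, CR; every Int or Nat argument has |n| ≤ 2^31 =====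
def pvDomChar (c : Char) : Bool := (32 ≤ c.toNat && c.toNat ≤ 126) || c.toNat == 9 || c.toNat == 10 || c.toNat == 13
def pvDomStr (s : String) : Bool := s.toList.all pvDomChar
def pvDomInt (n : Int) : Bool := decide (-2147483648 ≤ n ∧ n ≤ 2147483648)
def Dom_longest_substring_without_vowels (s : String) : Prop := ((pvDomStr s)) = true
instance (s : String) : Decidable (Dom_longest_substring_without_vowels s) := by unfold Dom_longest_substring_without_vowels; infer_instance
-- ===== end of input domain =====

-- B replaces A's running max/current-length scan by splitting s on vowels and
-- taking the maximum segment length (objective: simpler decomposition).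

-- ===== PORT A =====
def pvVowels : List Char := ['a', 'e', 'i', 'o', 'u']

-- the for-loop of A: state (max_length, current_length)
def pvLoopA (st : Int × Int) (ch : Char) : Int × Int :=
  if ¬ (pvVowels.contains ch) then (st.1, st.2 + 1)
  else (max st.1 st.2, 0)

def longest_substring_without_vowels (s : String) : Int :=
  let st := s.toList.foldl pvLoopA (0, 0)
  max st.1 st.2

-- ===== PORT B =====
def pvIsVowel (c : Char) : Bool := pvVowels.contains c

-- re.split(r'[aeiou]', s): the (always nonempty) list of vowel-free pieces
def pvSplitVowels : List Char → List (List Char)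
  | [] => [[]]
  | c :: cs =>
    if pvIsVowel c then [] :: pvSplitVowels cs
    else
      match pvSplitVowels cs with
      | [] => [[c]]        -- unreachable: pvSplitVowels is never empty
      | t :: ts => (c :: t) :: ts

def longest_substring_without_vowels_alt (s : String) : Int :=
  match (pvSplitVowels s.toList).map (fun t => (t.length : Int)) with
  | [] => 0                -- unreachable: split always yields ≥ 1 piece
  | x :: xs => xs.foldl max x

-- ===== PRECONDITION & SPEC =====
def Spec_longest_substring_without_vowels (s : String) (out : Int) : Prop := out = longest_substring_without_vowels_alt s
instance (s : String) (out : Int) : Decidable (Spec_longest_substring_without_vowels s out) := by unfold Spec_longest_substring_without_vowels; infer_instance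

-- ===== CLAIM (what is proved, stated in full; the proofs are below) =====
def Claim_equal_longest_substring_without_vowels : Prop := ∀ (s : String), Dom_longest_substring_without_vowels s → Spec_longest_substring_without_vowels s (longest_substring_without_vowels s)

-- ===== LEMMAS AND PROOFS =====

-- intermediate description of A's loop: aux c l = best run, where the first
-- run is seeded with c
def pvAux (c : Int) : List Char → Int
  | [] => c
  | x :: xs => if pvIsVowel x then max c (pvAux 0 xs) else pvAux (c + 1) xs

theorem pvAux_cons (c : Int) (x : Char) (xs : List Char) :
    pvAux c (x :: xs) = if pvIsVowel x then max c (pvAux 0 xs) else pvAux (c + 1) xs := rfl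

theorem pvSplit_ne_nil (l : List Char) : pvSplitVowels l ≠ [] := by
  cases l with
  | nil => simp [pvSplitVowels]
  | cons c cs =>
    simp only [pvSplitVowels]
    split
    · simp
    · split <;> simp

theorem pvLoopA_eq_aux (l : List Char) : ∀ (m c : Int),
    (let st := l.foldl pvLoopA (m, c); max st.1 st.2) = max m (pvAux c l) := by
  induction l with
  | nil => intro m c; simp [pvAux]
  | cons x xs ih =>
    intro m c
    by_cases h : pvIsVowel x
    · have hx : pvLoopA (m, c) x = (max m c, 0) := by
        simp [pvLoopA, pvIsVowel] at h ⊢; simp [h]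
      simp only [List.foldl_cons, hx, pvAux_cons, if_pos h]
      rw [ih]
      omega
    · have hx : pvLoopA (m, c) x = (m, c + 1) := by
        simp [pvLoopA, pvIsVowel] at h ⊢; simp [h]
      simp only [List.foldl_cons, hx, pvAux_cons, if_neg h]
      exact ih m (c + 1)

theorem pvFoldl_max_init (l : List Int) : ∀ a b : Int,
    max a (l.foldl max b) = l.foldl max (max a b) := by
  induction l with
  | nil => intro a b; simp
  | cons x xs ih =>
    intro a b
    simp only [List.foldl_cons]
    rw [ih]
    congr 1
    omega

theorem pvFoldl_max_ge (l : List Int) : ∀ b : Int, b ≤ l.foldl max b := by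
  induction l with
  | nil => intro b; simp
  | cons x xs ih =>
    intro b
    simp only [List.foldl_cons]
    have := ih (max b x)
    omega

theorem pvAux_eq_split (l : List Char) : ∀ c : Int,
    pvAux c l = (match (pvSplitVowels l).map (fun t => (t.length : Int)) with
                 | [] => c
                 | x :: xs => xs.foldl max (c + x)) := by
  induction l with
  | nil => intro c; simp [pvAux, pvSplitVowels]
  | cons ch cs ih =>
    intro c
    cases hs : pvSplitVowels cs with
    | nil => exact absurd hs (pvSplit_ne_nil cs)
    | cons t ts =>
      by_cases h : pvIsVowel ch
      · simp only [pvAux_cons, pvSplitVowels, h, if_true, hs]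
        rw [ih 0, hs]
        simp only [List.map_cons, List.foldl_cons, List.length_nil, Nat.cast_zero]
        rw [pvFoldl_max_init]
        congr 1
        omega
      · have hb : pvIsVowel ch = false := by simpa using h
        simp only [pvAux_cons, pvSplitVowels, hb, Bool.false_eq_true, if_false, hs]
        rw [ih (c + 1), hs]
        simp only [List.map_cons]
        congr 1
        simp only [List.length_cons]
        push_cast
        ring

-- ===== VERDICT (by name: the statement is the Claim_ definition above) =====
theorem longest_substring_without_vowels_spec : Claim_equal_longest_substring_without_vowels := by
  intro s _
  unfold Spec_longest_substring_without_vowels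
  unfold longest_substring_without_vowels longest_substring_without_vowels_alt
  rw [pvLoopA_eq_aux, pvAux_eq_split]
  cases hs : pvSplitVowels s.toList with
  | nil => exact absurd hs (pvSplit_ne_nil _)
  | cons t ts =>
    simp only [List.map_cons]
    have h2 : ((0:Int) + t.length) ≤ (ts.map (fun t => (t.length : Int))).foldl max ((0:Int) + t.length) :=
      pvFoldl_max_ge _ _
    have h3 : (0:Int) ≤ (0:Int) + t.length := by positivity
    rw [max_eq_right (by omega)]
    congr 1
    omega
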